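-- pv_equiv track=rewrite | github.com/leonleeldc/LeetCode_XDL | GraphProblems/grid_problems.py | hasPath_dfs
-- ===== SOURCE A (Python) =====
-- from typing import List
--
-- def hasPath_dfs(maze: List[List[int]], start: List[int], destination: List[int]) -> bool:
--   m, n = len(maze), len(maze[0])
--   visited = [[False] * n for _ in range(m)]
--   directions = [(0, 1), (0, -1), (1, 0), (-1, 0)]
--   def dfs(x, y):
--     if [x, y] == destination: return True
--     if visited[x][y]: return False
--     visited[x][y] = True
--     for dx, dy in directions:
--       xx, yy = x, y
--       while 0 <= xx + dx < m and 0 <= yy + dy < n and maze[xx + dx][yy + dy] == 0: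
--         xx += dx
--         yy += dy
--       if dfs(xx, yy): return True
--     return False
--   return dfs(start[0], start[1])
-- ===== SOURCE B (Python) =====
-- from typing import List
--
-- def hasPath_dfs(maze: List[List[int]], start: List[int], destination: List[int]) -> bool:
--   # Iterative breadth-first search with an explicit worklist queue (index-pointer
--   # list) instead of A's recursive depth-first search; same reachability result.
--   m, n = len(maze), len(maze[0])
--   visited = [[False] * n for _ in range(m)]
--   queue = [(start[0], start[1])]
--   i = 0
--   while i < len(queue):
--     x, y = queue[i]
--     i += 1
--     if [x, y] == destination:
--       return True
--     if visited[x][y]: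
--       continue
--     visited[x][y] = True
--     for dx, dy in ((0, 1), (0, -1), (1, 0), (-1, 0)):
--       xx, yy = x, y
--       while 0 <= xx + dx < m and 0 <= yy + dy < n and maze[xx + dx][yy + dy] == 0:
--         xx += dx
--         yy += dy
--       queue.append((xx, yy))
--   return False
-- ===== Notes on version B (the rewrite author's own statement) =====
-- stated objective: alternative
-- what changed: A's recursive depth-first search (implicit call stack, early return through the recursion) is replaced by an iterative breadth-first search that pops cells from an explicit worklist queue, marks them visited and appends the four roll-stop cells.
-- outside the precondition, e.g. on hasPath_dfs([[0, 0], [0]], [0, 0], [0, 1]): A returns True, B returns True; on hasPath_dfs([[0, 0, 0, 1], [0, 0, 0]], [0, 0], [1, 2]): A returns True, B raises IndexError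
import Mathlib
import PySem

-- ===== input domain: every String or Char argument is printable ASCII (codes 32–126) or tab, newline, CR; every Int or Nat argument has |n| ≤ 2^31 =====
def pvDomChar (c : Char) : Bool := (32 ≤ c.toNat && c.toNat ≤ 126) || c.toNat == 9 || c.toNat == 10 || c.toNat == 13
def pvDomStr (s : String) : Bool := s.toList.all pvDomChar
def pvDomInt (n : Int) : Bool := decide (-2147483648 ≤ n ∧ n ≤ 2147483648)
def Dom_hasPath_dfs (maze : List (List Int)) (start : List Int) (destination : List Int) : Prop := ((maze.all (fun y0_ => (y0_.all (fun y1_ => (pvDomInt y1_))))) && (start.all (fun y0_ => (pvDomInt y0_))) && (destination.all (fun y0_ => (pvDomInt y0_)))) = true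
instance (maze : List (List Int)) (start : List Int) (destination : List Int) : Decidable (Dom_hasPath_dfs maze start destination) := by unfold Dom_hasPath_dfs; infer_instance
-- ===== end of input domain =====

-- B replaces A's recursive depth-first search by an iterative breadth-first search over an
-- explicit worklist queue (alternative decomposition; same reachability answer, same cost).

-- ===== PORT A =====
-- maze[i][j]; used only under the while-loop's bounds guard 0 ≤ i < m, 0 ≤ j < n, where it
-- equals Python's indexing (Pre_ guarantees a non-empty maze whose rows all have length ≥ n).
def pvCell (maze : List (List Int)) (x y : Int) : Int :=
  (maze.getD x.toNat []).getD y.toNat 1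

-- the 'while 0 <= xx+dx < m and 0 <= yy+dy < n and maze[..][..] == 0' loop, which appears
-- verbatim in BOTH Source A and Source B; fueled — each iteration needs 0 ≤ xx+dx < m and 0 ≤ yy+dy < n,
-- so at most m (resp. n) iterations ever run and fuel m.toNat+n.toNat+2 is always enough: exact.
def pvRollGo (maze : List (List Int)) (m n dx dy : Int) : Nat → Int → Int → Int × Int
  | 0, x, y => (x, y)
  | f+1, x, y =>
    if 0 ≤ x + dx ∧ x + dx < m ∧ 0 ≤ y + dy ∧ y + dy < n ∧ pvCell maze (x + dx) (y + dy) = 0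
    then pvRollGo maze m n dx dy f (x + dx) (y + dy)
    else (x, y)

def pvRoll (maze : List (List Int)) (m n x y dx dy : Int) : Int × Int :=
  pvRollGo maze m n dx dy (m.toNat + n.toNat + 2) x y

def pvDirs : List (Int × Int) := [(0, 1), (0, -1), (1, 0), (-1, 0)]

-- Python's visited[x][y] on an m×n boolean grid: for -m ≤ x < m and -n ≤ y < n (the range
-- Pre_ admits) a negative index wraps, i.e. the cell addressed is (x mod m, y mod n); exact there.
def pvKey (m n x y : Int) : Int × Int := (Int.emod x m, Int.emod y n)

-- the 'for dx, dy in directions' loop of A's dfs, threading the mutated visited list;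
-- rec is the recursive call dfs at one fuel less.
def pvDfsStep (maze : List (List Int)) (m n : Int)
    (rec : Int → Int → List (Int × Int) → Bool × List (Int × Int)) :
    List (Int × Int) → List (Int × Int) → Int → Int → Bool × List (Int × Int)
  | [], v, _, _ => (false, v)
  | d :: ds, v, x, y =>
    let q := pvRoll maze m n x y d.1 d.2
    let r := rec q.1 q.2 v
    if r.1 then r else pvDfsStep maze m n rec ds r.2 x y

-- A's dfs; fueled by m*n+1, which the proofs show never runs out on inputs satisfying Pre_
-- (each non-trivial call marks a fresh visited cell of the m×n grid).
def pvDfsA (maze : List (List Int)) (m n : Int) (dest : List Int) :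
    Nat → List (Int × Int) → Int → Int → Bool × List (Int × Int)
  | 0, v, _, _ => (false, v)
  | f+1, v, x, y =>
    if [x, y] = dest then (true, v)
    else if pvKey m n x y ∈ v then (false, v)
    else pvDfsStep maze m n (fun a b w => pvDfsA maze m n dest f w a b) pvDirs
      (pvKey m n x y :: v) x y

def hasPath_dfs (maze : List (List Int)) (start : List Int) (destination : List Int) : Bool :=
  (pvDfsA maze (maze.length : Int) ((maze.headD []).length : Int) destination
    (maze.length * (maze.headD []).length + 1) []
    (start.getD 0 0) (start.getD 1 0)).1

-- ===== PORT B =====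
-- Source B's BFS: worklist queue (popped from the front = the index pointer i), visited grid keyed
-- as in pvKey; each popped cell is tested against destination, then marked, and its four
-- roll-stops are appended. Fueled by 4*m*n+2: every pop consumes one enqueued entry and at
-- most 1+4*m*n entries are ever enqueued on inputs satisfying Pre_.
def pvBfs (maze : List (List Int)) (m n : Int) (dest : List Int) :
    Nat → List (Int × Int) → List (Int × Int) → Bool
  | 0, _, _ => false
  | _+1, [], _ => false
  | f+1, p :: qs, v =>
    if [p.1, p.2] = dest then true
    else if pvKey m n p.1 p.2 ∈ v then pvBfs maze m n dest f qs v
    else pvBfs maze m n dest f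
      (qs ++ pvDirs.map (fun d => pvRoll maze m n p.1 p.2 d.1 d.2))
      (pvKey m n p.1 p.2 :: v)

def hasPath_dfs_alt (maze : List (List Int)) (start : List Int) (destination : List Int) : Bool :=
  pvBfs maze (maze.length : Int) ((maze.headD []).length : Int) destination
    (4 * (maze.length * (maze.headD []).length) + 2)
    [(start.getD 0 0, start.getD 1 0)] []

-- ===== PRECONDITION & SPEC =====
-- Pre_ excludes the empty maze and too-short starts (Python raises IndexError) and — unless the
-- destination equals the start, where A answers before touching the grid — mazes with a row
-- shorter than row 0 (a short row can raise IndexError) and starts outside the index range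
-- [-m, m) × [-n, n) of the visited grid (IndexError).
def Pre_hasPath_dfs (maze : List (List Int)) (start : List Int) (destination : List Int) : Prop :=
  0 < maze.length ∧ 2 ≤ start.length ∧
  (destination = [start.getD 0 0, start.getD 1 0] ∨
    (0 < (maze.headD []).length ∧
     (∀ row ∈ maze, (maze.headD []).length ≤ row.length) ∧
     -(maze.length : Int) ≤ start.getD 0 0 ∧ start.getD 0 0 < (maze.length : Int) ∧
     -((maze.headD []).length : Int) ≤ start.getD 1 0 ∧
     start.getD 1 0 < ((maze.headD []).length : Int)))
instance (maze : List (List Int)) (start : List Int) (destination : List Int) : Decidable (Pre_hasPath_dfs maze start destination) := by unfold Pre_hasPath_dfs; infer_instance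

def pvWitness_hasPath_dfs : List (List Int) × List Int × List Int := ([[0, 0], [1, 0]], [0, 0], [1, 1])

def Spec_hasPath_dfs (maze : List (List Int)) (start : List Int) (destination : List Int) (out : Bool) : Prop := out = hasPath_dfs_alt maze start destination
instance (maze : List (List Int)) (start : List Int) (destination : List Int) (out : Bool) : Decidable (Spec_hasPath_dfs maze start destination out) := by unfold Spec_hasPath_dfs; infer_instance

-- ===== CLAIM (what is proved, stated in full; the proofs are below) =====
def Claim_equal_hasPath_dfs : Prop := ∀ (maze : List (List Int)) (start : List Int) (destination : List Int), Dom_hasPath_dfs maze start destination → Pre_hasPath_dfs maze start destination → Spec_hasPath_dfs maze start destination (hasPath_dfs maze start destination)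

-- ===== LEMMAS AND PROOFS =====

def pvInb (m n : Int) (p : Int × Int) : Prop := 0 ≤ p.1 ∧ p.1 < m ∧ 0 ≤ p.2 ∧ p.2 < n

def pvK (m n : Int) (p : Int × Int) : Int × Int := pvKey m n p.1 p.2

-- the positions either algorithm can ever stand on: grid cells, plus the start itself
def pvGood (m n : Int) (S p : Int × Int) : Prop := pvInb m n p ∨ p = S

def pvIB (m n : Int) : Finset (Int × Int) :=
  (Finset.range m.toNat ×ˢ Finset.range n.toNat).image (fun ab => ((ab.1 : Int), (ab.2 : Int)))

def pvU (m n : Int) (v : List (Int × Int)) : Nat := ((pvIB m n) \ v.toFinset).card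

def pvStep (maze : List (List Int)) (m n : Int) (p q : Int × Int) : Prop :=
  ∃ d ∈ pvDirs, q = pvRoll maze m n p.1 p.2 d.1 d.2

-- one move of the search both programs perform: a roll, from a position that is either the
-- start or whose visited-key differs from the start's (the start's key is marked first, so the
-- one grid cell aliased with an out-of-range start is tested against the destination but never
-- expanded — by both programs alike)
def pvStepW (maze : List (List Int)) (m n : Int) (S p q : Int × Int) : Prop :=
  pvStep maze m n p q ∧ (p = S ∨ pvK m n p ≠ pvK m n S)

def pvReachW (maze : List (List Int)) (m n : Int) (S : Int × Int) : Int × Int → Int × Int → Prop :=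
  Relation.ReflTransGen (pvStepW maze m n S)

def pvRA (maze : List (List Int)) (m n : Int) (v : List (Int × Int)) (p q : Int × Int) : Prop :=
  pvStep maze m n p q ∧ pvK m n p ∉ v

lemma mem_pvIB {m n : Int} {p : Int × Int} : p ∈ pvIB m n ↔ pvInb m n p := by
  unfold pvIB pvInb
  simp only [Finset.mem_image, Finset.mem_product, Finset.mem_range, Prod.exists]
  constructor
  · rintro ⟨a, b, ⟨ha, hb⟩, rfl⟩; refine ⟨by omega, by omega, by omega, by omega⟩
  · rintro ⟨h1, h2, h3, h4⟩
    exact ⟨p.1.toNat, p.2.toNat, ⟨by omega, by omega⟩, by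
      cases p with | mk a b => simp; constructor <;> omega⟩

lemma pvK_inb {m n : Int} (hm : 0 < m) (hn : 0 < n) (p : Int × Int) :
    pvInb m n (pvK m n p) := by
  refine ⟨Int.emod_nonneg _ (by omega), Int.emod_lt_of_pos _ hm,
    Int.emod_nonneg _ (by omega), Int.emod_lt_of_pos _ hn⟩

lemma pvK_id {m n : Int} {p : Int × Int} (h : pvInb m n p) : pvK m n p = p := by
  obtain ⟨h1, h2, h3, h4⟩ := h
  unfold pvK pvKey
  cases p with | mk a b =>
    simp only [Prod.mk.injEq]
    exact ⟨Int.emod_eq_of_lt h1 h2, Int.emod_eq_of_lt h3 h4⟩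

lemma rollGo_inb (maze : List (List Int)) (m n dx dy : Int) :
    ∀ (f : Nat) (x y : Int), pvInb m n (x, y) → pvInb m n (pvRollGo maze m n dx dy f x y) := by
  intro f
  induction f with
  | zero => intro x y h; exact h
  | succ f ih =>
    intro x y h
    unfold pvRollGo
    split
    · next hc => exact ih _ _ ⟨hc.1, hc.2.1, hc.2.2.1, hc.2.2.2.1⟩
    · exact h

lemma rollGo_self_or_inb (maze : List (List Int)) (m n dx dy : Int) :
    ∀ (f : Nat) (x y : Int), pvRollGo maze m n dx dy f x y = (x, y) ∨
      pvInb m n (pvRollGo maze m n dx dy f x y) := by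
  intro f
  induction f with
  | zero => intro x y; exact Or.inl rfl
  | succ f _ =>
    intro x y
    unfold pvRollGo
    split
    · next hc =>
      exact Or.inr (rollGo_inb maze m n dx dy f _ _ ⟨hc.1, hc.2.1, hc.2.2.1, hc.2.2.2.1⟩)
    · exact Or.inl rfl

lemma good_roll {maze : List (List Int)} {m n : Int} {S : Int × Int} {x y : Int} (dx dy : Int)
    (h : pvGood m n S (x, y)) : pvGood m n S (pvRoll maze m n x y dx dy) := by
  rcases rollGo_self_or_inb maze m n dx dy (m.toNat + n.toNat + 2) x y with h1 | h1
  · unfold pvRoll; rw [h1]; exact h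
  · exact Or.inl h1

lemma pvU_mono {m n : Int} {v w : List (Int × Int)} (h : ∀ p ∈ v, p ∈ w) :
    pvU m n w ≤ pvU m n v := by
  apply Finset.card_le_card
  apply Finset.sdiff_subset_sdiff (Finset.Subset.refl _)
  intro p hp
  simp only [List.mem_toFinset] at *
  exact h p hp

lemma pvU_cons_lt {m n : Int} {v : List (Int × Int)} {p : Int × Int}
    (hp : pvInb m n p) (hnv : p ∉ v) : pvU m n (p :: v) < pvU m n v := by
  unfold pvU
  have h1 : pvIB m n \ (p :: v).toFinset = (pvIB m n \ v.toFinset).erase p := by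
    rw [List.toFinset_cons, Finset.sdiff_insert]
  rw [h1]
  apply Finset.card_erase_lt_of_mem
  simp only [Finset.mem_sdiff, List.mem_toFinset]
  exact ⟨mem_pvIB.2 hp, hnv⟩

lemma pvU_nil_le (m n : Int) : pvU m n [] ≤ m.toNat * n.toNat := by
  unfold pvU pvIB
  simp only [List.toFinset_nil, Finset.sdiff_empty]
  calc ((Finset.range m.toNat ×ˢ Finset.range n.toNat).image _).card
      ≤ (Finset.range m.toNat ×ˢ Finset.range n.toNat).card := Finset.card_image_le
    _ = m.toNat * n.toNat := by rw [Finset.card_product]; simp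

-- two distinct possible positions share a visited-key only if one of them is the start and the
-- start's key is already marked
lemma good_key_unique {m n : Int} {S p q : Int × Int} {v : List (Int × Int)}
    (hp : pvGood m n S p) (hq : pvGood m n S q) (hk : pvK m n p = pvK m n q)
    (hS : pvK m n S ∈ v) (hnv : pvK m n p ∉ v) : p = q := by
  rcases hp with hp | hp <;> rcases hq with hq | hq
  · rw [pvK_id hp, pvK_id hq] at hk; exact hk
  · subst hq; rw [hk] at hnv; exact absurd hS hnv
  · subst hp; exact absurd hS hnv
  · subst hp; subst hq; rfl

lemma RA_mono {maze : List (List Int)} {m n : Int} {v w : List (Int × Int)}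
    (hvw : ∀ p ∈ v, p ∈ w) {a b : Int × Int}
    (h : Relation.ReflTransGen (pvRA maze m n w) a b) :
    Relation.ReflTransGen (pvRA maze m n v) a b :=
  Relation.ReflTransGen.mono (fun _ _ hab => ⟨hab.1, fun hx => hab.2 (hvw _ hx)⟩) h

lemma RA_to_W {maze : List (List Int)} {m n : Int} {S : Int × Int} {v : List (Int × Int)}
    (hS : pvK m n S ∈ v) {a b : Int × Int}
    (h : Relation.ReflTransGen (pvRA maze m n v) a b) : pvReachW maze m n S a b :=
  Relation.ReflTransGen.mono
    (fun _ _ hab => ⟨hab.1, Or.inr (fun he => hab.2 (he ▸ hS))⟩) h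

-- ---- DFS (port A): the visited list only grows ----

lemma dfsStep_mono (maze : List (List Int)) (m n : Int)
    (rec : Int → Int → List (Int × Int) → Bool × List (Int × Int))
    (hrec : ∀ a b w, ∀ p ∈ w, p ∈ (rec a b w).2) :
    ∀ (ds v : List (Int × Int)) (x y : Int), ∀ p ∈ v,
      p ∈ (pvDfsStep maze m n rec ds v x y).2 := by
  intro ds
  induction ds with
  | nil => intro v x y p hp; exact hp
  | cons d ds ih =>
    intro v x y p hp
    rw [pvDfsStep]
    split
    · exact hrec _ _ _ p hp
    · exact ih _ _ _ p (hrec _ _ _ p hp)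

lemma dfsA_mono (maze : List (List Int)) (m n : Int) (dest : List Int) :
    ∀ (f : Nat) (v : List (Int × Int)) (x y : Int), ∀ p ∈ v, p ∈ (pvDfsA maze m n dest f v x y).2 := by
  intro f
  induction f with
  | zero => intro v x y p hp; exact hp
  | succ f ih =>
    intro v x y p hp
    rw [pvDfsA]
    split
    · exact hp
    · split
      · exact hp
      · exact dfsStep_mono maze m n _ (fun a b w => ih w a b) pvDirs _ x y p
          (List.mem_cons_of_mem _ hp)

-- ---- DFS (port A) soundness: a true answer exhibits a path avoiding the initial visited keys ----

lemma dfsStep_sound (maze : List (List Int)) (m n : Int) (dest : List Int) (f : Nat)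
    (IH : ∀ (v : List (Int × Int)) (a b : Int), (pvDfsA maze m n dest f v a b).1 = true →
      ∃ p, Relation.ReflTransGen (pvRA maze m n v) (a, b) p ∧ [p.1, p.2] = dest) :
    ∀ (ds : List (Int × Int)), (∀ d ∈ ds, d ∈ pvDirs) →
      ∀ (v : List (Int × Int)) (x y : Int),
      (pvDfsStep maze m n (fun a b w => pvDfsA maze m n dest f w a b) ds v x y).1 = true →
      ∃ d ∈ ds, ∃ p,
        Relation.ReflTransGen (pvRA maze m n v)
          (pvRoll maze m n x y d.1 d.2) p ∧ [p.1, p.2] = dest := by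
  intro ds hds
  induction ds with
  | nil => intro v x y h; simp [pvDfsStep] at h
  | cons d ds ih =>
    intro v x y h
    rw [pvDfsStep] at h
    by_cases hr : (pvDfsA maze m n dest f v (pvRoll maze m n x y d.1 d.2).1 (pvRoll maze m n x y d.1 d.2).2).1 = true
    · obtain ⟨p, hp, hd⟩ := IH _ _ _ hr
      exact ⟨d, List.mem_cons_self .., p, by simpa using hp, hd⟩
    · simp only [hr] at h
      obtain ⟨d', hd', p, hp, hdd⟩ := ih (fun d' hd' => hds d' (List.mem_cons_of_mem _ hd')) _ _ _ h
      refine ⟨d', List.mem_cons_of_mem _ hd', p, RA_mono ?_ hp, hdd⟩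
      exact fun p hp => dfsA_mono maze m n dest f v _ _ p hp

lemma dfsA_sound (maze : List (List Int)) (m n : Int) (dest : List Int) :
    ∀ (f : Nat) (v : List (Int × Int)) (x y : Int), (pvDfsA maze m n dest f v x y).1 = true →
      ∃ p, Relation.ReflTransGen (pvRA maze m n v) (x, y) p ∧ [p.1, p.2] = dest := by
  intro f
  induction f with
  | zero => intro v x y h; simp [pvDfsA] at h
  | succ f ih =>
    intro v x y h
    rw [pvDfsA] at h
    by_cases h1 : [x, y] = dest
    · exact ⟨(x, y), Relation.ReflTransGen.refl, h1⟩
    · rw [if_neg h1] at h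
      by_cases h2 : pvKey m n x y ∈ v
      · simp [h2] at h
      · rw [if_neg h2] at h
        obtain ⟨d, hd, p, hp, hdd⟩ :=
          dfsStep_sound maze m n dest f (fun v a b => ih v a b) pvDirs (fun d hd => hd) _ x y h
        refine ⟨p, Relation.ReflTransGen.head ⟨⟨d, hd, rfl⟩, h2⟩ ?_, hdd⟩
        exact RA_mono (fun p hp => List.mem_cons_of_mem _ hp) hp

-- ---- DFS (port A) completeness invariant ----

lemma dfsStep_false (maze : List (List Int)) (m n : Int) (dest : List Int) (S : Int × Int)
    (f : Nat)
    (IH : ∀ (v : List (Int × Int)) (x y : Int) (v' : List (Int × Int)),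
      pvDfsA maze m n dest f v x y = (false, v') →
      pvGood m n S (x, y) → (∀ kk ∈ v, pvInb m n kk) → pvK m n S ∈ v → pvU m n v < f →
      (∀ kk ∈ v, kk ∈ v') ∧ pvKey m n x y ∈ v' ∧ [x, y] ≠ dest ∧ (∀ kk ∈ v', pvInb m n kk) ∧
      (∀ p, pvGood m n S p → pvK m n p ∈ v' → pvK m n p ∉ v →
        [p.1, p.2] ≠ dest ∧ ∀ d ∈ pvDirs,
          pvK m n (pvRoll maze m n p.1 p.2 d.1 d.2) ∈ v' ∧
          [(pvRoll maze m n p.1 p.2 d.1 d.2).1, (pvRoll maze m n p.1 p.2 d.1 d.2).2] ≠ dest)) :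
    ∀ (ds : List (Int × Int)) (v : List (Int × Int)) (x y : Int) (v' : List (Int × Int)),
      pvDfsStep maze m n (fun a b w => pvDfsA maze m n dest f w a b) ds v x y = (false, v') →
      pvGood m n S (x, y) → (∀ kk ∈ v, pvInb m n kk) → pvK m n S ∈ v → pvU m n v < f →
      (∀ kk ∈ v, kk ∈ v') ∧ (∀ kk ∈ v', pvInb m n kk) ∧
      (∀ p, pvGood m n S p → pvK m n p ∈ v' → pvK m n p ∉ v →
        [p.1, p.2] ≠ dest ∧ ∀ d ∈ pvDirs,
          pvK m n (pvRoll maze m n p.1 p.2 d.1 d.2) ∈ v' ∧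
          [(pvRoll maze m n p.1 p.2 d.1 d.2).1, (pvRoll maze m n p.1 p.2 d.1 d.2).2] ≠ dest) ∧
      (∀ d ∈ ds, pvK m n (pvRoll maze m n x y d.1 d.2) ∈ v' ∧
        [(pvRoll maze m n x y d.1 d.2).1, (pvRoll maze m n x y d.1 d.2).2] ≠ dest) := by
  intro ds
  induction ds with
  | nil =>
    intro v x y v' h hxy hv hS hu
    rw [pvDfsStep] at h
    cases h
    refine ⟨fun kk hk => hk, hv, ?_, fun d hd => by simp at hd⟩
    intro p _ hp hnp
    exact (hnp hp).elim
  | cons d ds ih =>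
    intro v x y v' h hxy hv hS hu
    rw [pvDfsStep] at h
    set q := pvRoll maze m n x y d.1 d.2 with hq
    set r := pvDfsA maze m n dest f v q.1 q.2 with hr
    by_cases hb : r.1 = true
    · rw [if_pos hb] at h; rw [h] at hb; simp at hb
    · rw [if_neg hb] at h
      have hreq : pvDfsA maze m n dest f v q.1 q.2 = (false, r.2) := by
        rw [← hr]; ext
        · simp [hb]
        · rfl
      have hqg : pvGood m n S q := good_roll d.1 d.2 hxy
      obtain ⟨c1, c2, c3, c4, c5⟩ := IH v q.1 q.2 r.2 hreq hqg hv hS hu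
      have hu2 : pvU m n r.2 < f := lt_of_le_of_lt (pvU_mono c1) hu
      obtain ⟨d1, d2, d3, d4⟩ := ih r.2 x y v' h hxy c4 (c1 _ hS) hu2
      refine ⟨fun kk hk => d1 kk (c1 kk hk), d2, ?_, ?_⟩
      · intro p hpg hp hnp
        by_cases hp2 : pvK m n p ∈ r.2
        · obtain ⟨e1, e2⟩ := c5 p hpg hp2 hnp
          exact ⟨e1, fun d' hd' => ⟨d1 _ (e2 d' hd').1, (e2 d' hd').2⟩⟩
        · exact d3 p hpg hp hp2
      · intro d' hd'
        rcases List.mem_cons.1 hd' with h1 | h1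
        · subst h1
          exact ⟨d1 _ c2, c3⟩
        · exact d4 d' h1

lemma dfsA_false (maze : List (List Int)) (m n : Int) (dest : List Int) (S : Int × Int)
    (hm : 0 < m) (hn : 0 < n) :
    ∀ (f : Nat) (v : List (Int × Int)) (x y : Int) (v' : List (Int × Int)),
      pvDfsA maze m n dest f v x y = (false, v') →
      pvGood m n S (x, y) → (∀ kk ∈ v, pvInb m n kk) → pvK m n S ∈ v → pvU m n v < f →
      (∀ kk ∈ v, kk ∈ v') ∧ pvKey m n x y ∈ v' ∧ [x, y] ≠ dest ∧ (∀ kk ∈ v', pvInb m n kk) ∧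
      (∀ p, pvGood m n S p → pvK m n p ∈ v' → pvK m n p ∉ v →
        [p.1, p.2] ≠ dest ∧ ∀ d ∈ pvDirs,
          pvK m n (pvRoll maze m n p.1 p.2 d.1 d.2) ∈ v' ∧
          [(pvRoll maze m n p.1 p.2 d.1 d.2).1, (pvRoll maze m n p.1 p.2 d.1 d.2).2] ≠ dest) := by
  intro f
  induction f with
  | zero => intro v x y v' h hxy hv hS hu; omega
  | succ f ih =>
    intro v x y v' h hxy hv hS hu
    rw [pvDfsA] at h
    by_cases h1 : [x, y] = dest
    · rw [if_pos h1] at h; cases h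
    · rw [if_neg h1] at h
      by_cases h2 : pvKey m n x y ∈ v
      · rw [if_pos h2] at h
        cases h
        refine ⟨fun kk hk => hk, h2, h1, hv, ?_⟩
        intro p _ hp hnp
        exact (hnp hp).elim
      · rw [if_neg h2] at h
        have hkinb : pvInb m n (pvKey m n x y) := pvK_inb hm hn (x, y)
        have hv1 : ∀ kk ∈ pvKey m n x y :: v, pvInb m n kk := by
          intro kk hk
          rcases List.mem_cons.1 hk with h3 | h3
          · subst h3; exact hkinb
          · exact hv kk h3
        have hu1 : pvU m n (pvKey m n x y :: v) < f := by
          have := pvU_cons_lt (m := m) (n := n) (v := v) hkinb h2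
          omega
        obtain ⟨c1, c2, c3, c4⟩ := dfsStep_false maze m n dest S f ih pvDirs _ x y v' h
          hxy hv1 (List.mem_cons_of_mem _ hS) hu1
        refine ⟨fun kk hk => c1 kk (List.mem_cons_of_mem _ hk),
          c1 _ (List.mem_cons_self ..), h1, c2, ?_⟩
        intro p hpg hp hnp
        by_cases hpx : pvK m n p = pvK m n (x, y)
        · have hpeq : p = (x, y) := good_key_unique hpg hxy hpx hS (hpx ▸ h2)
          subst hpeq
          exact ⟨h1, c4⟩
        · refine c3 p hpg hp ?_
          intro hmem
          rcases List.mem_cons.1 hmem with h3 | h3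
          · exact hpx h3
          · exact hnp h3

-- ---- BFS (port B) soundness ----

lemma bfs_sound (maze : List (List Int)) (m n : Int) (dest : List Int) :
    ∀ (f : Nat) (q : List (Int × Int)) (v : List (Int × Int)),
      pvBfs maze m n dest f q v = true →
      ∃ p0 ∈ q, ∃ p, Relation.ReflTransGen (pvRA maze m n v) p0 p ∧ [p.1, p.2] = dest := by
  intro f
  induction f with
  | zero => intro q v h; simp [pvBfs] at h
  | succ f ih =>
    intro q v h
    cases q with
    | nil => simp [pvBfs] at h
    | cons p qs =>
      rw [pvBfs] at h
      by_cases h1 : [p.1, p.2] = dest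
      · exact ⟨p, List.mem_cons_self .., p, Relation.ReflTransGen.refl, h1⟩
      · rw [if_neg h1] at h
        by_cases h2 : pvKey m n p.1 p.2 ∈ v
        · rw [if_pos h2] at h
          obtain ⟨p0, hp0, hp⟩ := ih _ _ h
          exact ⟨p0, List.mem_cons_of_mem _ hp0, hp⟩
        · rw [if_neg h2] at h
          obtain ⟨p0, hp0, p', hre, hd⟩ := ih _ _ h
          have hre' : Relation.ReflTransGen (pvRA maze m n v) p0 p' :=
            RA_mono (fun kk hk => List.mem_cons_of_mem _ hk) hre
          rcases List.mem_append.1 hp0 with h3 | h3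
          · exact ⟨p0, List.mem_cons_of_mem _ h3, p', hre', hd⟩
          · obtain ⟨d, hd', rfl⟩ := List.mem_map.1 h3
            exact ⟨p, List.mem_cons_self .., p',
              Relation.ReflTransGen.head ⟨⟨d, hd', rfl⟩, h2⟩ hre', hd⟩

-- ---- BFS (port B) completeness ----

lemma bfs_false (maze : List (List Int)) (m n : Int) (dest : List Int) (S : Int × Int) :
    ∀ (f : Nat) (q : List (Int × Int)) (v : List (Int × Int)),
      pvBfs maze m n dest f q v = false →
      (∀ p ∈ q, pvGood m n S p) → (∀ kk ∈ v, pvInb m n kk) → pvK m n S ∈ v →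
      q.length + 4 * pvU m n v < f →
      ([S.1, S.2] ≠ dest ∧ ∀ d ∈ pvDirs,
        pvRoll maze m n S.1 S.2 d.1 d.2 ∈ q ∨
        (pvK m n (pvRoll maze m n S.1 S.2 d.1 d.2) ∈ v ∧
         [(pvRoll maze m n S.1 S.2 d.1 d.2).1, (pvRoll maze m n S.1 S.2 d.1 d.2).2] ≠ dest)) →
      (∀ kk ∈ v, kk ≠ pvK m n S → [kk.1, kk.2] ≠ dest ∧ ∀ d ∈ pvDirs,
        pvRoll maze m n kk.1 kk.2 d.1 d.2 ∈ q ∨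
        (pvK m n (pvRoll maze m n kk.1 kk.2 d.1 d.2) ∈ v ∧
         [(pvRoll maze m n kk.1 kk.2 d.1 d.2).1, (pvRoll maze m n kk.1 kk.2 d.1 d.2).2] ≠ dest)) →
      ∀ p, pvGood m n S p → (p ∈ q ∨ (pvK m n p ∈ v ∧ (p = S ∨ pvK m n p ≠ pvK m n S))) →
      ∀ r, pvReachW maze m n S p r → [r.1, r.2] ≠ dest := by
  intro f
  induction f with
  | zero => intro q v _ _ _ _ hfu; omega
  | succ f ih =>
    intro q v h hG hv hS hfu hclS hclO
    cases q with
    | nil =>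
      -- the queue is empty: the visited keys are closed under rolling; kill any path by
      -- induction from its head
      intro p hpg hp r hre
      have hp' : p = S ∨ (pvInb m n p ∧ p ∈ v ∧ p ≠ pvK m n S) := by
        rcases hp with h1 | ⟨h1, h2⟩
        · simp at h1
        · rcases h2 with h2 | h2
          · exact Or.inl h2
          · rcases hpg with h3 | h3
            · exact Or.inr ⟨h3, by rw [← pvK_id h3]; exact h1, by rw [← pvK_id h3]; exact h2⟩
            · exact Or.inl h3
      clear hp hpg
      induction hre using Relation.ReflTransGen.head_induction_on with
      | refl =>
        rcases hp' with h1 | ⟨h1, h2, h3⟩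
        · subst h1; exact hclS.1
        · exact (hclO r h2 h3).1
      | head hst hrest ihh =>
        rename_i a c
        obtain ⟨⟨d, hd, hcr⟩, _⟩ := hst
        have hchild : pvK m n c ∈ v ∧ [c.1, c.2] ≠ dest := by
          rcases hp' with h1 | ⟨h1, h2, h3⟩
          · subst h1
            rcases hclS.2 d hd with h4 | h4
            · simp at h4
            · rw [hcr]; exact h4
          · rcases (hclO a h2 h3).2 d hd with h4 | h4
            · simp at h4
            · rw [hcr]; exact h4
        have hcg : pvGood m n S c := by
          rw [hcr]
          rcases hp' with h1 | ⟨h1, _, _⟩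
          · exact good_roll d.1 d.2 (h1 ▸ Or.inr rfl)
          · exact good_roll d.1 d.2 (Or.inl h1)
        by_cases hcs : c = S
        · exact ihh (Or.inl hcs)
        · have hcinb : pvInb m n c := by
            rcases hcg with h5 | h5
            · exact h5
            · exact absurd h5 hcs
          by_cases hck : c = pvK m n S
          · -- the aliased grid cell: it is tested against the destination but never expanded,
            -- and a pvStepW path cannot continue from it
            rcases (Relation.ReflTransGen.cases_head hrest) with h5 | ⟨x, hx, _⟩
            · rw [← h5]; exact hchild.2
            · rcases hx.2 with h6 | h6
              · exact absurd h6 hcs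
              · rw [pvK_id hcinb] at h6; exact absurd hck h6
          · exact ihh (Or.inr ⟨hcinb, by rw [← pvK_id hcinb]; exact hchild.1, hck⟩)
    | cons p qs =>
      rw [pvBfs] at h
      by_cases h1 : [p.1, p.2] = dest
      · rw [if_pos h1] at h; cases h
      · rw [if_neg h1] at h
        by_cases h2 : pvKey m n p.1 p.2 ∈ v
        · rw [if_pos h2] at h
          have hres := ih qs v h (fun p' hp' => hG p' (List.mem_cons_of_mem _ hp')) hv hS
            (by simp at hfu ⊢; omega)
            (by
              refine ⟨hclS.1, fun d hd => ?_⟩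
              rcases hclS.2 d hd with h3 | h3
              · rcases List.mem_cons.1 h3 with h4 | h4
                · exact Or.inr ⟨by rw [h4]; exact h2, by rw [h4]; exact h1⟩
                · exact Or.inl h4
              · exact Or.inr h3)
            (by
              intro kk hk hkn
              refine ⟨(hclO kk hk hkn).1, fun d hd => ?_⟩
              rcases (hclO kk hk hkn).2 d hd with h3 | h3
              · rcases List.mem_cons.1 h3 with h4 | h4
                · exact Or.inr ⟨by rw [h4]; exact h2, by rw [h4]; exact h1⟩
                · exact Or.inl h4
              · exact Or.inr h3)
          intro p' hpg hp' r hre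
          rcases hp' with h3 | h3
          · rcases List.mem_cons.1 h3 with h4 | h4
            · subst h4
              rcases (Relation.ReflTransGen.cases_head hre) with h5 | ⟨x, hx, _⟩
              · rw [← h5]; exact h1
              · rcases hx.2 with h6 | h6
                · subst h6
                  exact hres p' hpg (Or.inr ⟨hS, Or.inl rfl⟩) r hre
                · exact hres p' hpg (Or.inr ⟨h2, Or.inr h6⟩) r hre
            · exact hres p' hpg (Or.inl h4) r hre
          · exact hres p' hpg (Or.inr h3) r hre
        · rw [if_neg h2] at h
          have hpg0 : pvGood m n S p := hG p (List.mem_cons_self ..)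
          have hps : p ≠ S := by
            intro he; subst he; exact h2 hS
          have hpinb : pvInb m n p := by
            rcases hpg0 with h3 | h3
            · exact h3
            · exact absurd h3 hps
          have hkp : pvKey m n p.1 p.2 = p := pvK_id hpinb
          have hkps : p ≠ pvK m n S := fun he => h2 (by rw [hkp, he]; exact hS)
          rw [hkp] at h h2
          have hres := ih (qs ++ pvDirs.map (fun d => pvRoll maze m n p.1 p.2 d.1 d.2)) (p :: v) h
            (by
              intro p' hp'
              rcases List.mem_append.1 hp' with h3 | h3
              · exact hG p' (List.mem_cons_of_mem _ h3)
              · obtain ⟨d, _, rfl⟩ := List.mem_map.1 h3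
                exact good_roll d.1 d.2 hpg0)
            (by
              intro kk hk
              rcases List.mem_cons.1 hk with h3 | h3
              · subst h3; exact hpinb
              · exact hv kk h3)
            (List.mem_cons_of_mem _ hS)
            (by
              rw [List.length_append, List.length_map]
              have hlt := pvU_cons_lt (m := m) (n := n) (v := v) hpinb h2
              simp only [pvDirs] at *
              simp at hfu ⊢
              omega)
            (by
              refine ⟨hclS.1, fun d hd => ?_⟩
              rcases hclS.2 d hd with h3 | h3
              · rcases List.mem_cons.1 h3 with h4 | h4
                · exact Or.inr ⟨by rw [h4, pvK_id hpinb]; exact List.mem_cons_self ..,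
                    by rw [h4]; exact h1⟩
                · exact Or.inl (List.mem_append.2 (Or.inl h4))
              · exact Or.inr ⟨List.mem_cons_of_mem _ h3.1, h3.2⟩)
            (by
              intro kk hk hkn
              rcases List.mem_cons.1 hk with h3 | h3
              · subst h3
                refine ⟨h1, fun d hd => Or.inl ?_⟩
                exact List.mem_append.2 (Or.inr (List.mem_map.2 ⟨d, hd, rfl⟩))
              · refine ⟨(hclO kk h3 hkn).1, fun d hd => ?_⟩
                rcases (hclO kk h3 hkn).2 d hd with h4 | h4
                · rcases List.mem_cons.1 h4 with h5 | h5
                  · exact Or.inr ⟨by rw [h5, pvK_id hpinb]; exact List.mem_cons_self ..,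
                      by rw [h5]; exact h1⟩
                  · exact Or.inl (List.mem_append.2 (Or.inl h5))
                · exact Or.inr ⟨List.mem_cons_of_mem _ h4.1, h4.2⟩)
          intro p' hpg hp' r hre
          rcases hp' with h3 | h3
          · rcases List.mem_cons.1 h3 with h4 | h4
            · subst h4
              exact hres p' hpg
                (Or.inr ⟨by rw [pvK_id hpinb]; exact List.mem_cons_self ..,
                  Or.inr (by rw [pvK_id hpinb]; exact hkps)⟩) r hre
            · exact hres p' hpg (Or.inl (List.mem_append.2 (Or.inl h4))) r hre
          · exact hres p' hpg (Or.inr ⟨List.mem_cons_of_mem _ h3.1, h3.2⟩) r hre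

-- ---- putting it together ----

lemma dfs_iff (maze : List (List Int)) (start dest : List Int)
    (hm : 0 < maze.length) (hn : 0 < (maze.headD []).length) :
    hasPath_dfs maze start dest = true ↔
    ∃ p, pvReachW maze (maze.length : Int) ((maze.headD []).length : Int)
      (start.getD 0 0, start.getD 1 0) (start.getD 0 0, start.getD 1 0) p ∧
      [p.1, p.2] = dest := by
  set m : Int := (maze.length : Int) with hmdef
  set n : Int := ((maze.headD []).length : Int) with hndef
  set sx : Int := start.getD 0 0
  set sy : Int := start.getD 1 0
  have hm' : 0 < m := by rw [hmdef]; exact_mod_cast hm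
  have hn' : 0 < n := by rw [hndef]; exact_mod_cast hn
  by_cases hds : [sx, sy] = dest
  · have hA : hasPath_dfs maze start dest = true := by
      unfold hasPath_dfs
      rw [pvDfsA, if_pos hds]
    rw [hA]
    simp only [true_iff]
    exact ⟨(sx, sy), Relation.ReflTransGen.refl, hds⟩
  · have hunf : hasPath_dfs maze start dest =
        (pvDfsStep maze m n
          (fun a b w => pvDfsA maze m n dest (maze.length * (maze.headD []).length) w a b)
          pvDirs [pvKey m n sx sy] sx sy).1 := by
      unfold hasPath_dfs
      rw [pvDfsA, if_neg hds, if_neg (List.not_mem_nil)]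
    rw [hunf]
    have hSmem : pvK m n (sx, sy) ∈ [pvKey m n sx sy] := List.mem_singleton.2 rfl
    constructor
    · intro h
      obtain ⟨d, hd, p, hp, hdd⟩ := dfsStep_sound maze m n dest _
        (fun v a b => dfsA_sound maze m n dest _ v a b) pvDirs (fun d hd => hd) _ sx sy h
      exact ⟨p, Relation.ReflTransGen.head ⟨⟨d, hd, rfl⟩, Or.inl rfl⟩ (RA_to_W hSmem hp), hdd⟩
    · intro ⟨p, hre, hdd⟩
      by_contra hfalse
      rw [Bool.not_eq_true] at hfalse
      set res := pvDfsStep maze m n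
        (fun a b w => pvDfsA maze m n dest (maze.length * (maze.headD []).length) w a b)
        pvDirs [pvKey m n sx sy] sx sy with hres
      have hreq : pvDfsStep maze m n
          (fun a b w => pvDfsA maze m n dest (maze.length * (maze.headD []).length) w a b)
          pvDirs [pvKey m n sx sy] sx sy = (false, res.2) := by
        rw [← hres]; ext
        · simpa using hfalse
        · rfl
      have hu : pvU m n [pvKey m n sx sy] < maze.length * (maze.headD []).length := by
        have hlt := pvU_cons_lt (m := m) (n := n) (v := []) (pvK_inb hm' hn' (sx, sy))
          (List.not_mem_nil)
        have hkk : pvK m n (sx, sy) = pvKey m n sx sy := rfl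
        rw [hkk] at hlt
        have hle := pvU_nil_le m n
        have hm2 : m.toNat = maze.length := by rw [hmdef]; exact Int.toNat_natCast _
        have hn2 : n.toNat = (maze.headD []).length := by rw [hndef]; exact Int.toNat_natCast _
        rw [hm2, hn2] at hle
        omega
      obtain ⟨c1, c2, c3, c4⟩ := dfsStep_false maze m n dest (sx, sy) _
        (fun v x y v' => dfsA_false maze m n dest (sx, sy) hm' hn' _ v x y v')
        pvDirs _ sx sy res.2 hreq (Or.inr rfl)
        (by
          intro kk hk
          rw [List.mem_singleton] at hk
          subst hk
          exact pvK_inb hm' hn' (sx, sy))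
        hSmem hu
      -- kill the witnessed path by induction from its head
      have hkill : ∀ a r, pvReachW maze m n (sx, sy) a r →
          (a = (sx, sy) ∨ (pvInb m n a ∧ a ≠ pvK m n (sx, sy) ∧ a ∈ res.2)) →
          [r.1, r.2] ≠ dest := by
        intro a r hre2 ha
        induction hre2 using Relation.ReflTransGen.head_induction_on with
        | refl =>
          rcases ha with h1 | ⟨h1, h2, h3⟩
          · subst h1; exact hds
          · exact (c3 r (Or.inl h1) (by rw [pvK_id h1]; exact h3)
              (by rw [pvK_id h1]; simpa using h2)).1
        | head hst hrest ihh =>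
          rename_i a' c'
          obtain ⟨⟨d, hd, hcr⟩, _⟩ := hst
          have hchild : pvK m n c' ∈ res.2 ∧ [c'.1, c'.2] ≠ dest := by
            rcases ha with h1 | ⟨h1, h2, h3⟩
            · subst h1; rw [hcr]; exact c4 d hd
            · have := (c3 a' (Or.inl h1) (by rw [pvK_id h1]; exact h3)
                (by rw [pvK_id h1]; simpa using h2)).2 d hd
              rw [hcr]; exact this
          have hcg : pvGood m n (sx, sy) c' := by
            rw [hcr]
            rcases ha with h1 | ⟨h1, _, _⟩
            · exact good_roll d.1 d.2 (h1 ▸ Or.inr rfl)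
            · exact good_roll d.1 d.2 (Or.inl h1)
          by_cases hcs : c' = (sx, sy)
          · exact ihh (Or.inl hcs)
          · have hcinb : pvInb m n c' := by
              rcases hcg with h5 | h5
              · exact h5
              · exact absurd h5 hcs
            by_cases hck : c' = pvK m n (sx, sy)
            · rcases (Relation.ReflTransGen.cases_head hrest) with h5 | ⟨x, hx, _⟩
              · rw [← h5]; exact hchild.2
              · rcases hx.2 with h6 | h6
                · exact absurd h6 hcs
                · rw [pvK_id hcinb] at h6; exact absurd hck h6
            · exact ihh (Or.inr ⟨hcinb, hck, by rw [← pvK_id hcinb]; exact hchild.1⟩)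
      exact hkill (sx, sy) p hre (Or.inl rfl) hdd

lemma bfs_iff (maze : List (List Int)) (start dest : List Int)
    (hm : 0 < maze.length) (hn : 0 < (maze.headD []).length) :
    hasPath_dfs_alt maze start dest = true ↔
    ∃ p, pvReachW maze (maze.length : Int) ((maze.headD []).length : Int)
      (start.getD 0 0, start.getD 1 0) (start.getD 0 0, start.getD 1 0) p ∧
      [p.1, p.2] = dest := by
  set m : Int := (maze.length : Int) with hmdef
  set n : Int := ((maze.headD []).length : Int) with hndef
  set sx : Int := start.getD 0 0
  set sy : Int := start.getD 1 0
  have hm' : 0 < m := by rw [hmdef]; exact_mod_cast hm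
  have hn' : 0 < n := by rw [hndef]; exact_mod_cast hn
  by_cases hds : [sx, sy] = dest
  · have hB : hasPath_dfs_alt maze start dest = true := by
      unfold hasPath_dfs_alt
      rw [pvBfs, if_pos hds]
    rw [hB]
    simp only [true_iff]
    exact ⟨(sx, sy), Relation.ReflTransGen.refl, hds⟩
  · have hunf : hasPath_dfs_alt maze start dest =
        pvBfs maze m n dest (4 * (maze.length * (maze.headD []).length) + 1)
          (pvDirs.map (fun d => pvRoll maze m n sx sy d.1 d.2)) [pvKey m n sx sy] := by
      unfold hasPath_dfs_alt
      rw [pvBfs, if_neg hds, if_neg (List.not_mem_nil)]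
      rw [List.nil_append]
    rw [hunf]
    have hSmem : pvK m n (sx, sy) ∈ [pvKey m n sx sy] := List.mem_singleton.2 rfl
    constructor
    · intro h
      obtain ⟨p0, hp0, p, hp, hdd⟩ := bfs_sound maze m n dest _ _ _ h
      obtain ⟨d, hd, rfl⟩ := List.mem_map.1 hp0
      exact ⟨p, Relation.ReflTransGen.head ⟨⟨d, hd, rfl⟩, Or.inl rfl⟩ (RA_to_W hSmem hp), hdd⟩
    · intro ⟨p, hre, hdd⟩
      by_contra hfalse
      rw [Bool.not_eq_true] at hfalse
      have hu : pvU m n [pvKey m n sx sy] < maze.length * (maze.headD []).length := by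
        have hlt := pvU_cons_lt (m := m) (n := n) (v := []) (pvK_inb hm' hn' (sx, sy))
          (List.not_mem_nil)
        have hkk : pvK m n (sx, sy) = pvKey m n sx sy := rfl
        rw [hkk] at hlt
        have hle := pvU_nil_le m n
        have hm2 : m.toNat = maze.length := by rw [hmdef]; exact Int.toNat_natCast _
        have hn2 : n.toNat = (maze.headD []).length := by rw [hndef]; exact Int.toNat_natCast _
        rw [hm2, hn2] at hle
        omega
      have hres := bfs_false maze m n dest (sx, sy) _ _ _ hfalse
        (by
          intro p' hp'
          obtain ⟨d, _, rfl⟩ := List.mem_map.1 hp'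
          exact good_roll d.1 d.2 (Or.inr rfl))
        (by
          intro kk hk
          rw [List.mem_singleton] at hk
          subst hk
          exact pvK_inb hm' hn' (sx, sy))
        hSmem
        (by
          rw [List.length_map]
          simp only [pvDirs, List.length_cons, List.length_nil]
          omega)
        (by
          refine ⟨hds, fun d hd => Or.inl ?_⟩
          exact List.mem_map.2 ⟨d, hd, rfl⟩)
        (by
          intro kk hk hkn
          rw [List.mem_singleton] at hk
          exact absurd hk hkn)
      exact hres (sx, sy) (Or.inr rfl) (Or.inr ⟨hSmem, Or.inl rfl⟩) p hre hdd

-- when destination equals [start[0], start[1]], both searches answer true at the very first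
-- destination test, before any grid access
lemma both_true_of_dest_eq (maze : List (List Int)) (start dest : List Int)
    (h : dest = [start.getD 0 0, start.getD 1 0]) :
    hasPath_dfs maze start dest = true ∧ hasPath_dfs_alt maze start dest = true := by
  subst h
  constructor
  · unfold hasPath_dfs
    rw [pvDfsA]
    simp
  · unfold hasPath_dfs_alt
    rw [pvBfs]
    simp

-- ===== VERDICT (by name: the statement is the Claim_ definition above) =====
theorem hasPath_dfs_spec : Claim_equal_hasPath_dfs := by
  intro maze start destination _ hpre
  unfold Spec_hasPath_dfs
  obtain ⟨hm, hs, hcase⟩ := hpre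
  rcases hcase with heq | ⟨hn, hrows, h1, h2, h3, h4⟩
  · obtain ⟨e1, e2⟩ := both_true_of_dest_eq maze start destination heq
    rw [e1, e2]
  · have h12 := (dfs_iff maze start destination hm hn).trans
      (bfs_iff maze start destination hm hn).symm
    cases hA : hasPath_dfs maze start destination <;>
      cases hB : hasPath_dfs_alt maze start destination <;> simp_all
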